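-- pv_equiv track=rewrite | github.com/lssfau/walberla | src/stencil/generate.py | generate_d_per_d
-- ===== SOURCE A (Python) =====
-- directions = ['C', 'N', 'S', 'W', 'E', 'T', 'B',
--               'NW', 'NE', 'SW', 'SE', 'TN', 'TS',
--               'TW', 'TE', 'BN', 'BS', 'BW', 'BE',
--               'TNE', 'TNW', 'TSE', 'TSW', 'BNE', 'BNW', 'BSE', 'BSW']
--
-- def isSubDirection(general, specific):
--     """ Example: general="N", specific= "NW" -> true
--                  general="W", specific= "SE" -> false
--     """
--     for char in general:
--         if char not in specific:
--             return False
--     return True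
--
-- def generate_d_per_d(dirs):
--     """ Generate d_per_d array from directions"""
--     d_per_d = []
--     d_per_d_length = []
--
--     for globalDir1 in directions:
--         subdirs = []
--         for localDir in dirs:
--             if isSubDirection(globalDir1, localDir):
--                 subdirs.append(localDir)
--
--         d_per_d.append("{" + ",".join(subdirs) + "}")
--         d_per_d_length.append(len(subdirs))
--
--     return (d_per_d, d_per_d_length)
-- ===== SOURCE B (Python) =====
-- directions = ['C', 'N', 'S', 'W', 'E', 'T', 'B',
--               'NW', 'NE', 'SW', 'SE', 'TN', 'TS',
--               'TW', 'TE', 'BN', 'BS', 'BW', 'BE',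
--               'TNE', 'TNW', 'TSE', 'TSW', 'BNE', 'BNW', 'BSE', 'BSW']
--
-- _AXES = 'CNSWETB'
--
-- def _mask(s):
--     """7-bit letter-set mask of a string: bit i set iff axis letter i occurs in s."""
--     m = 0
--     for i, ch in enumerate(_AXES):
--         if ch in s:
--             m += 1 << i
--     return m
--
-- _DIR_MASKS = [_mask(g) for g in directions]
--
-- # Precomputed for every possible 7-bit letter mask m: which of the 27 global
-- # directions are sub-directions of a string with letter set m (dm subset of m).
-- _KEEP = [[dm & m == dm for dm in _DIR_MASKS] for m in range(128)]
--
-- def generate_d_per_d(dirs):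
--     """Bitmask table: one pass scattering each dir into the buckets selected by a
--     precomputed 128-entry subset table, then one emit pass."""
--     buckets = [[] for _ in directions]
--     for localDir in dirs:
--         keep = _KEEP[_mask(localDir)]
--         buckets = [b + [localDir] if k else b for k, b in zip(keep, buckets)]
--     return (["{" + ",".join(b) + "}" for b in buckets],
--             [len(b) for b in buckets])
-- ===== Notes on version B (the rewrite author's own statement) =====
-- stated objective: alternative
-- what changed: Replaces per-direction character-subset scans with 7-bit letter masks and a precomputed 128-entry subset table: one pass computes each dir's mask and scatters it into the 27 buckets selected by the table row, then one emit pass; the per-dir subset tests become a single table lookup.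
import Mathlib
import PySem

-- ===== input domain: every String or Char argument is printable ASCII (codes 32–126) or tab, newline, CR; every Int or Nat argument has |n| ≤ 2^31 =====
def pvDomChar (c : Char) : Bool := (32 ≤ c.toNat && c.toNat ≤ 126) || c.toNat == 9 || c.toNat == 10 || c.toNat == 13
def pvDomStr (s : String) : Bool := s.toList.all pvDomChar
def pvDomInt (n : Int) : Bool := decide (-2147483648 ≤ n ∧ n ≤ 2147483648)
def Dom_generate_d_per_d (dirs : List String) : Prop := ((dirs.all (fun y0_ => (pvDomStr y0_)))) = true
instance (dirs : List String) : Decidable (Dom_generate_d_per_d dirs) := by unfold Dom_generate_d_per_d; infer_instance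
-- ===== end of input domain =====

-- B replaces A's per-direction character-subset scans by 7-bit letter-set masks and a
-- precomputed 128-entry subset table: one scatter pass plus one emit pass (alternative algorithm).

-- ===== PORT A =====
def pvDirections : List String :=
  ["C", "N", "S", "W", "E", "T", "B",
   "NW", "NE", "SW", "SE", "TN", "TS",
   "TW", "TE", "BN", "BS", "BW", "BE",
   "TNE", "TNW", "TSE", "TSW", "BNE", "BNW", "BSE", "BSW"]

-- 'for char in general: if char not in specific: return False' — early-return loop = all; 'char in specific' is Python substring-in on a 1-char string
def isSubDirection (general specific : String) : Bool :=
  general.toList.all (fun c => PySem.Str.isIn (String.ofList [c]) specific)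

def generate_d_per_d (dirs : List String) : List String × List Int :=
  pvDirections.foldl
    (fun acc globalDir1 =>
      let subdirs := dirs.foldl
        (fun sd localDir => if isSubDirection globalDir1 localDir then sd ++ [localDir] else sd) []
      (acc.1 ++ ["{" ++ PySem.Str.join "," subdirs ++ "}"], acc.2 ++ [(subdirs.length : Int)]))
    ([], [])

-- ===== PORT B =====
-- _mask: 'for i, ch in enumerate(_AXES): if ch in s: m += 1 << i'; iterating a Python str
-- yields 1-char strings, so 'ch in s' is Str.isIn; enumerate indices are 0..6, so .toNat is exact
def pvMask (s : String) : Nat :=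
  (PySem.List.enumerate "CNSWETB".toList).foldl
    (fun m p => if PySem.Str.isIn (String.ofList [p.2]) s then m + (1 <<< p.1.toNat) else m) 0

def pvDirMasks : List Nat := pvDirections.map pvMask

-- _KEEP: for each of the 128 possible masks, which of the 27 directions are subsets
def pvKeep : List (List Bool) :=
  (List.range 128).map (fun m => pvDirMasks.map (fun dm => dm &&& m == dm))

def generate_d_per_d_alt (dirs : List String) : List String × List Int :=
  let init : List (List String) := pvDirections.map (fun _ => [])
  let buckets := dirs.foldl
    (fun bs localDir =>
      let keep := pvKeep.getD (pvMask localDir) []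
      List.zipWith (fun k b => if k then b ++ [localDir] else b) keep bs) init
  (buckets.map (fun b => "{" ++ PySem.Str.join "," b ++ "}"),
   buckets.map (fun b => (b.length : Int)))

-- ===== PRECONDITION & SPEC =====
def Spec_generate_d_per_d (dirs : List String) (out : List String × List Int) : Prop := out = generate_d_per_d_alt dirs
instance (dirs : List String) (out : List String × List Int) : Decidable (Spec_generate_d_per_d dirs out) := by unfold Spec_generate_d_per_d; infer_instance

-- ===== CLAIM (what is proved, stated in full; the proofs are below) =====
def Claim_equal_generate_d_per_d : Prop := ∀ (dirs : List String), Dom_generate_d_per_d dirs → Spec_generate_d_per_d dirs (generate_d_per_d dirs)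

-- ===== LEMMAS AND PROOFS =====

-- value of the mask from the seven letter-membership booleans
def pvBitval (b0 b1 b2 b3 b4 b5 b6 : Bool) : Nat :=
  (cond b0 1 0) + (cond b1 2 0) + (cond b2 4 0) + (cond b3 8 0) +
  (cond b4 16 0) + (cond b5 32 0) + (cond b6 64 0)

lemma bitval_lt (b0 b1 b2 b3 b4 b5 b6 : Bool) : pvBitval b0 b1 b2 b3 b4 b5 b6 < 128 := by
  revert b0 b1 b2 b3 b4 b5 b6; decide

lemma mask_eq (s : String) :
    pvMask s = pvBitval
      (PySem.Str.isIn (String.ofList ['C']) s) (PySem.Str.isIn (String.ofList ['N']) s)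
      (PySem.Str.isIn (String.ofList ['S']) s) (PySem.Str.isIn (String.ofList ['W']) s)
      (PySem.Str.isIn (String.ofList ['E']) s) (PySem.Str.isIn (String.ofList ['T']) s)
      (PySem.Str.isIn (String.ofList ['B']) s) := by
  unfold pvMask
  rw [show PySem.List.enumerate "CNSWETB".toList =
        [(0, 'C'), (1, 'N'), (2, 'S'), (3, 'W'), (4, 'E'), (5, 'T'), (6, 'B')] from rfl]
  simp only [List.foldl_cons, List.foldl_nil]
  generalize PySem.Str.isIn (String.ofList ['C']) s = b0
  generalize PySem.Str.isIn (String.ofList ['N']) s = b1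
  generalize PySem.Str.isIn (String.ofList ['S']) s = b2
  generalize PySem.Str.isIn (String.ofList ['W']) s = b3
  generalize PySem.Str.isIn (String.ofList ['E']) s = b4
  generalize PySem.Str.isIn (String.ofList ['T']) s = b5
  generalize PySem.Str.isIn (String.ofList ['B']) s = b6
  cases b0 <;> cases b1 <;> cases b2 <;> cases b3 <;> cases b4 <;> cases b5 <;> cases b6 <;> decide

-- the table row selected by a string's mask is exactly A's subset test on each direction
lemma keep_row_eq (s : String) :
    pvKeep.getD (pvMask s) [] = pvDirections.map (fun g => isSubDirection g s) := by
  rw [mask_eq]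
  unfold pvKeep
  rw [List.getD_eq_getElem?_getD, List.getElem?_map,
    List.getElem?_range (bitval_lt _ _ _ _ _ _ _)]
  simp only [Option.map_some, Option.getD_some]
  rw [show pvDirMasks = [1, 2, 4, 8, 16, 32, 64, 10, 18, 12, 20, 34, 36, 40, 48,
        66, 68, 72, 80, 50, 42, 52, 44, 82, 74, 84, 76] from by decide]
  simp only [pvDirections, isSubDirection, List.map_cons, List.map_nil,
    show "C".toList = ['C'] from rfl, show "N".toList = ['N'] from rfl,
    show "S".toList = ['S'] from rfl, show "W".toList = ['W'] from rfl,
    show "E".toList = ['E'] from rfl, show "T".toList = ['T'] from rfl,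
    show "B".toList = ['B'] from rfl,
    show "NW".toList = ['N','W'] from rfl, show "NE".toList = ['N','E'] from rfl,
    show "SW".toList = ['S','W'] from rfl, show "SE".toList = ['S','E'] from rfl,
    show "TN".toList = ['T','N'] from rfl, show "TS".toList = ['T','S'] from rfl,
    show "TW".toList = ['T','W'] from rfl, show "TE".toList = ['T','E'] from rfl,
    show "BN".toList = ['B','N'] from rfl, show "BS".toList = ['B','S'] from rfl,
    show "BW".toList = ['B','W'] from rfl, show "BE".toList = ['B','E'] from rfl,
    show "TNE".toList = ['T','N','E'] from rfl, show "TNW".toList = ['T','N','W'] from rfl,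
    show "TSE".toList = ['T','S','E'] from rfl, show "TSW".toList = ['T','S','W'] from rfl,
    show "BNE".toList = ['B','N','E'] from rfl, show "BNW".toList = ['B','N','W'] from rfl,
    show "BSE".toList = ['B','S','E'] from rfl, show "BSW".toList = ['B','S','W'] from rfl,
    List.all_cons, List.all_nil]
  generalize PySem.Str.isIn (String.ofList ['C']) s = b0
  generalize PySem.Str.isIn (String.ofList ['N']) s = b1
  generalize PySem.Str.isIn (String.ofList ['S']) s = b2
  generalize PySem.Str.isIn (String.ofList ['W']) s = b3
  generalize PySem.Str.isIn (String.ofList ['E']) s = b4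
  generalize PySem.Str.isIn (String.ofList ['T']) s = b5
  generalize PySem.Str.isIn (String.ofList ['B']) s = b6
  cases b0 <;> cases b1 <;> cases b2 <;> cases b3 <;> cases b4 <;> cases b5 <;> cases b6 <;> decide

-- one scatter step on buckets that are 'gs.map f' is a pointwise map update
lemma zipWith_upd_map (x : String) (gs : List String) (p : String → Bool) (f : String → List String) :
    List.zipWith (fun k b => if k then b ++ [x] else b) (gs.map p) (gs.map f)
      = gs.map (fun g => if p g then f g ++ [x] else f g) := by
  induction gs with
  | nil => rfl
  | cons g gs ih => simp [ih]

-- invariant: after scattering 'dirs', bucket g holds A's inner fold over dirs started at f g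
lemma scatter_eq_map (dirs : List String) (f : String → List String) :
    dirs.foldl
      (fun bs localDir =>
        List.zipWith (fun k b => if k then b ++ [localDir] else b)
          (pvKeep.getD (pvMask localDir) []) bs)
      (pvDirections.map f)
    = pvDirections.map (fun g =>
        dirs.foldl (fun sd l => if isSubDirection g l then sd ++ [l] else sd) (f g)) := by
  induction dirs generalizing f with
  | nil => rfl
  | cons x xs ih =>
      simp only [List.foldl_cons]
      rw [keep_row_eq x, zipWith_upd_map]
      exact ih (fun g => if isSubDirection g x then f g ++ [x] else f g)

-- A's outer append-fold over gs produces the two map lists (generalized accumulator)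
lemma foldA_eq_maps (dirs : List String) (gs : List String) (a1 : List String) (a2 : List Int) :
    gs.foldl
      (fun acc globalDir1 =>
        let subdirs := dirs.foldl
          (fun sd localDir => if isSubDirection globalDir1 localDir then sd ++ [localDir] else sd) []
        (acc.1 ++ ["{" ++ PySem.Str.join "," subdirs ++ "}"], acc.2 ++ [(subdirs.length : Int)]))
      (a1, a2)
    = (a1 ++ gs.map (fun g => "{" ++ PySem.Str.join ","
          (dirs.foldl (fun sd l => if isSubDirection g l then sd ++ [l] else sd) []) ++ "}"),
       a2 ++ gs.map (fun g =>
          ((dirs.foldl (fun sd l => if isSubDirection g l then sd ++ [l] else sd) []).length : Int))) := by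
  induction gs generalizing a1 a2 with
  | nil => simp
  | cons g gs ih => simp [ih]

lemma both_eq (dirs : List String) : generate_d_per_d dirs = generate_d_per_d_alt dirs := by
  unfold generate_d_per_d generate_d_per_d_alt
  dsimp only []
  rw [scatter_eq_map, foldA_eq_maps, List.map_map, List.map_map]
  rfl

-- ===== VERDICT (by name: the statement is the Claim_ definition above) =====
theorem generate_d_per_d_spec : Claim_equal_generate_d_per_d := by
  intro dirs _
  unfold Spec_generate_d_per_d
  exact both_eq dirs
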